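-- pv_equiv track=rewrite | github.com/yaggul/Programming0 | week4/9-Winter-Is-Coming/winter.py | winter_is_coming
-- ===== SOURCE A (Python) =====
-- def winter_is_coming(seasons):
--     count=0
--     start=0
--     while start<len(seasons):
--         if seasons[start]!='winter':
--             count+=1
--             start+=1
--         else:
--             count=0
--             start+=1
--     if count>=5:
--         return True
--     else:
--         return False
-- ===== SOURCE B (Python) =====
-- def winter_is_coming(seasons):
--     count = 0
--     for s in reversed(seasons):
--         if s == 'winter':
--             break
--         count += 1
--     return count >= 5
-- ===== Notes on version B (the rewrite author's own statement) =====
-- stated objective: faster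
-- what changed: B scans the list backwards and breaks at the first 'winter', counting only the trailing non-winter run, instead of A's forward full scan whose counter resets to 0 at each 'winter'.
import Mathlib
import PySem

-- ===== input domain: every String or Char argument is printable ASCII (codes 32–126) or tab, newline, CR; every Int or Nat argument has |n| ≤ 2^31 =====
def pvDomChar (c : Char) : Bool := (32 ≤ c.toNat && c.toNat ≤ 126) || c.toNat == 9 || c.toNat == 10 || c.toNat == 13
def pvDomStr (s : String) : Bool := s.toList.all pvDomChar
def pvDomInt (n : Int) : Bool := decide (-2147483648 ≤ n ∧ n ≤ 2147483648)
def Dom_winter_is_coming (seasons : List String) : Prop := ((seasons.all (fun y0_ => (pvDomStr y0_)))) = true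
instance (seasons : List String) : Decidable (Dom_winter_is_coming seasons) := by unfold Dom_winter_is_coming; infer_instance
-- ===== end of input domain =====

-- B scans backwards and breaks at the first 'winter' (counts only the trailing run), instead of A's
-- forward full scan whose counter resets at every 'winter'; same result, alternative decomposition.

-- ===== PORT A =====
-- A's while loop over indices, consuming the list front-to-back with the counter state.
def pvLoopA : List String → Int → Int
  | [], count => count
  | s :: rest, count =>
      if s ≠ "winter" then pvLoopA rest (count + 1)
      else pvLoopA rest 0

def winter_is_coming (seasons : List String) : Bool :=
  if pvLoopA seasons 0 ≥ 5 then true else false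

-- ===== PORT B =====
-- B's for-loop over reversed(seasons) with break at the first 'winter'.
def pvCountRev : List String → Int
  | [] => 0
  | s :: rest => if s = "winter" then 0 else 1 + pvCountRev rest

def winter_is_coming_alt (seasons : List String) : Bool :=
  pvCountRev seasons.reverse ≥ 5

-- ===== PRECONDITION & SPEC =====
def Spec_winter_is_coming (seasons : List String) (out : Bool) : Prop := out = winter_is_coming_alt seasons
instance (seasons : List String) (out : Bool) : Decidable (Spec_winter_is_coming seasons out) := by unfold Spec_winter_is_coming; infer_instance

-- ===== CLAIM (what is proved, stated in full; the proofs are below) =====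
def Claim_equal_winter_is_coming : Prop := ∀ (seasons : List String), Dom_winter_is_coming seasons → Spec_winter_is_coming seasons (winter_is_coming seasons)

-- ===== LEMMAS AND PROOFS =====

theorem pvCountRev_no_winter (r : List String) (h : "winter" ∉ r) :
    pvCountRev r = r.length := by
  induction r with
  | nil => simp [pvCountRev]
  | cons s rest ih =>
      simp only [List.mem_cons, not_or] at h
      simp [pvCountRev, Ne.symm h.1, ih h.2]; ring

theorem pvLoopA_append (l : List String) (s : String) (c : Int) :
    pvLoopA (l ++ [s]) c = if s ≠ "winter" then pvLoopA l c + 1 else 0 := by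
  induction l generalizing c with
  | nil => by_cases hs : s = "winter" <;> simp [pvLoopA, hs]
  | cons x rest ih => by_cases hx : x = "winter" <;> simp [pvLoopA, hx, ih]

theorem pvLoopA_eq (l : List String) (c : Int) :
    pvLoopA l c = if "winter" ∈ l then pvCountRev l.reverse else c + l.length := by
  induction l using List.reverseRecOn generalizing c with
  | nil => simp [pvLoopA]
  | append_singleton l s ih =>
      rw [pvLoopA_append]
      by_cases hs : s = "winter"
      · simp [hs, pvCountRev]
      · by_cases hm : "winter" ∈ l
        · simp [hs, hm, pvCountRev, Ne.symm hs, ih]; ring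
        · simp [hs, hm, Ne.symm hs, ih]; ring

-- ===== VERDICT (by name: the statement is the Claim_ definition above) =====
theorem winter_is_coming_spec : Claim_equal_winter_is_coming := by
  intro seasons _
  unfold Spec_winter_is_coming winter_is_coming winter_is_coming_alt
  rw [pvLoopA_eq]
  by_cases hm : "winter" ∈ seasons
  · simp [hm]
  · have := pvCountRev_no_winter seasons.reverse (by simpa using hm)
    simp [hm, this]
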